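-- pv_equiv track=rewrite | github.com/JeremyKalfus/AutoMath | artifacts/r-k4e-k4e-k4e-three-uniform-hypergraph-ramsey/cyclic_search.py | constraint_domain
-- ===== SOURCE A (Python) =====
-- COLORS = (0, 1, 2)
--
-- def violates(cons, assignment):
--     counts = [0, 0, 0]
--     for var in cons:
--         color = assignment.get(var)
--         if color is None:
--             continue
--         counts[color] += 1
--     if max(counts) >= 3:
--         return True
--     unassigned = 4 - sum(counts)
--     for color in COLORS:
--         if counts[color] + unassigned >= 3:
--             return False
--     return True
--
-- def constraint_domain(cons, assignment):
--     vars_in_cons = []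
--     for var in cons:
--         if var not in assignment and var not in vars_in_cons:
--             vars_in_cons.append(var)
--     if not vars_in_cons:
--         return None
--     possible = {var: set() for var in vars_in_cons}
--     for colors in product_colors(len(vars_in_cons)):
--         trial = dict(assignment)
--         for var, color in zip(vars_in_cons, colors):
--             trial[var] = color
--         if not violates(cons, trial):
--             for var, color in zip(vars_in_cons, colors):
--                 possible[var].add(color)
--     return possible
--
-- def product_colors(k):
--     if k == 0:
--         yield ()
--         return
--     if k == 1:
--         for c in COLORS:
--             yield (c,)
--         return
--     for prefix in product_colors(k - 1):
--         for c in COLORS: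
--             yield prefix + (c,)
-- ===== SOURCE B (Python) =====
-- COLORS = (0, 1, 2)
--
-- def constraint_domain(cons, assignment):
--     vars_in_cons = []
--     for var in cons:
--         if var not in assignment and var not in vars_in_cons:
--             vars_in_cons.append(var)
--     if not vars_in_cons:
--         return None
--     # base color counts contributed by already-assigned occurrences in cons
--     base = [0, 0, 0]
--     for var in cons:
--         color = assignment.get(var)
--         if color is not None:
--             base[color] += 1
--     total = len(cons)
--     pairs = [(v, cons.count(v)) for v in vars_in_cons]
--     possible = {var: set() for var in vars_in_cons}
--
--     def record(chosen, counts):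
--         if any(counts[c] + (4 - total) >= 3 for c in COLORS):
--             for var, color in zip(vars_in_cons, chosen):
--                 possible[var].add(color)
--
--     def dfs(rest, counts, chosen):
--         if max(counts) >= 3:
--             return  # prune: counts only grow deeper in this branch
--         if not rest:
--             record(chosen, counts)
--             return
--         (_, w), rest2 = rest[0], rest[1:]
--         for c in COLORS:
--             nc = list(counts)
--             nc[c] += w
--             dfs(rest2, nc, chosen + [c])
--
--     dfs(pairs, base, [])
--     return possible
-- ===== Notes on version B (the rewrite author's own statement) =====
-- stated objective: faster
-- what changed: B precomputes base color counts and per-variable occurrence weights once, then explores colorings by a depth-first search over the distinct unassigned variables that prunes any branch whose partial counts already reach 3, instead of A's exhaustive 3^k generate-and-test that rebuilds a trial dict and recounts all of cons for every tuple; the DFS visits the surviving tuples in the same lexicographic order, so the result is identical.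
import Mathlib
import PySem

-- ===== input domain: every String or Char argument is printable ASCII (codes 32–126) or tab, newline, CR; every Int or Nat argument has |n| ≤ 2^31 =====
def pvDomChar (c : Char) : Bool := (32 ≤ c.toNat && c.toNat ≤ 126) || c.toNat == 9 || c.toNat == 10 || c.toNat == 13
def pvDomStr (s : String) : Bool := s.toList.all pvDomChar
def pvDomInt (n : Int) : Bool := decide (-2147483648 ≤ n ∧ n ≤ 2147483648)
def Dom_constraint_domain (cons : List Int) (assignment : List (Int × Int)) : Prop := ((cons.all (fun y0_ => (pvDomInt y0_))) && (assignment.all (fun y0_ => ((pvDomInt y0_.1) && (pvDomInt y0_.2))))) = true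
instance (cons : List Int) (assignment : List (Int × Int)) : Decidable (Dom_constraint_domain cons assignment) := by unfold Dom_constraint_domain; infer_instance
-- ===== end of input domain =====

-- B replaces A's exhaustive 3^k enumeration by a pruned depth-first search (same lexicographic
-- visit order) over precomputed base counts and per-variable occurrence weights: alternative/faster.


-- ===== PORT A =====
def violatesA (cons : List Int) (trial : PySem.Dict Int Int) : Bool :=
  let counts := cons.foldl (fun counts var =>
      match trial.get? var with
      | none => counts
      | some color => PySem.List.pySetD counts color (PySem.List.pyGetD counts color 0 + 1))
    ([0, 0, 0] : List Int)
  if PySem.List.maxD counts (fun x => x) 0 ≥ 3 then true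
  else
    let unassigned : Int := 4 - counts.sum
    if ([0, 1, 2] : List Int).any (fun color => PySem.List.pyGetD counts color 0 + unassigned ≥ 3) then false
    else true

def product_colors : Nat → List (List Int)
  | 0 => [[]]
  | 1 => [[0], [1], [2]]
  | k + 2 => (product_colors (k + 1)).flatMap (fun pre => ([0, 1, 2] : List Int).map (fun c => pre ++ [c]))

def constraint_domain (cons : List Int) (assignment : List (Int × Int)) : Option (List (Int × List Int)) :=
  let adict : PySem.Dict Int Int := PySem.Dict.mk assignment
  let vars_in_cons := cons.foldl (fun vs var => if !(adict.contains var) && !(vs.contains var) then vs ++ [var] else vs) []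
  if vars_in_cons = [] then none
  else
    let possible : PySem.Dict Int (List Int) := vars_in_cons.foldl (fun d v => d.insert v PySem.Set.empty) PySem.Dict.empty
    let result := (product_colors vars_in_cons.length).foldl (fun poss colors =>
      let trial := (vars_in_cons.zip colors).foldl (fun t p => t.insert p.1 p.2) adict
      if !(violatesA cons trial) then
        (vars_in_cons.zip colors).foldl (fun poss p => poss.modify p.1 PySem.Set.empty (fun s => PySem.Set.add s p.2)) poss
      else poss) possible
    some result.items

-- ===== PORT B =====
def bRecord (vars_in_cons : List Int) (total : Int) (chosen : List Int) (counts : List Int)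
    (possible : PySem.Dict Int (List Int)) : PySem.Dict Int (List Int) :=
  if ([0, 1, 2] : List Int).any (fun c => PySem.List.pyGetD counts c 0 + (4 - total) ≥ 3) then
    (vars_in_cons.zip chosen).foldl (fun poss p => poss.modify p.1 PySem.Set.empty (fun s => PySem.Set.add s p.2)) possible
  else possible

def bDfs (vars_in_cons : List Int) (total : Int) :
    List (Int × Int) → List Int → List Int → PySem.Dict Int (List Int) → PySem.Dict Int (List Int)
  | rest, counts, chosen, possible =>
    if PySem.List.maxD counts (fun x => x) 0 ≥ 3 then possible
    else
      match rest with
      | [] => bRecord vars_in_cons total chosen counts possible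
      | (_, w) :: rest2 =>
        -- Source B's 'for c in COLORS' loop, unrolled over the literal tuple COLORS = (0, 1, 2)
        let p0 := bDfs vars_in_cons total rest2 (PySem.List.pySetD counts 0 (PySem.List.pyGetD counts 0 0 + w)) (chosen ++ [0]) possible
        let p1 := bDfs vars_in_cons total rest2 (PySem.List.pySetD counts 1 (PySem.List.pyGetD counts 1 0 + w)) (chosen ++ [1]) p0
        bDfs vars_in_cons total rest2 (PySem.List.pySetD counts 2 (PySem.List.pyGetD counts 2 0 + w)) (chosen ++ [2]) p1

def constraint_domain_alt (cons : List Int) (assignment : List (Int × Int)) : Option (List (Int × List Int)) :=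
  let adict : PySem.Dict Int Int := PySem.Dict.mk assignment
  let vars_in_cons := cons.foldl (fun vs var => if !(adict.contains var) && !(vs.contains var) then vs ++ [var] else vs) []
  if vars_in_cons = [] then none
  else
    let base := cons.foldl (fun b var =>
      match adict.get? var with
      | none => b
      | some color => PySem.List.pySetD b color (PySem.List.pyGetD b color 0 + 1)) ([0, 0, 0] : List Int)
    let total : Int := PySem.List.len cons
    let pairs := vars_in_cons.map (fun v => (v, (PySem.List.count cons v : Int)))
    let possible : PySem.Dict Int (List Int) := vars_in_cons.foldl (fun d v => d.insert v PySem.Set.empty) PySem.Dict.empty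
    some (bDfs vars_in_cons total pairs base [] possible).items

-- ===== PRECONDITION & SPEC =====
-- Pre_ excludes exactly the inputs on which Python A raises IndexError: some constraint slot is
-- unassigned (so trial colorings are tested) while some assigned variable occurring in cons carries
-- a color code outside -3..2, which 'counts[color] += 1' cannot index.  B raises there too.
def Pre_constraint_domain (cons : List Int) (assignment : List (Int × Int)) : Prop :=
  (∀ v ∈ cons, (PySem.Dict.mk assignment).contains v = true) ∨
  (∀ v ∈ cons, ((PySem.Dict.mk assignment).get? v).all (fun c => decide (-3 ≤ c ∧ c ≤ 2)) = true)
instance (cons : List Int) (assignment : List (Int × Int)) : Decidable (Pre_constraint_domain cons assignment) := by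
  unfold Pre_constraint_domain; infer_instance

def pvWitness_constraint_domain : List Int × (List (Int × Int)) := ([0, 1, 2, 0], [(2, 0)])

def Spec_constraint_domain (cons : List Int) (assignment : List (Int × Int)) (out : Option (List (Int × List Int))) : Prop := out = constraint_domain_alt cons assignment
instance (cons : List Int) (assignment : List (Int × Int)) (out : Option (List (Int × List Int))) : Decidable (Spec_constraint_domain cons assignment out) := by unfold Spec_constraint_domain; infer_instance

-- ===== CLAIM (what is proved, stated in full; the proofs are below) =====
def Claim_equal_constraint_domain : Prop := ∀ (cons : List Int) (assignment : List (Int × Int)), Dom_constraint_domain cons assignment → Pre_constraint_domain cons assignment → Spec_constraint_domain cons assignment (constraint_domain cons assignment)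


-- ===== LEMMAS AND PROOFS =====

-- Abstract counts triple (counts[0], counts[1], counts[2]) used by the proofs.
def tl (t : Int × Int × Int) : List Int := [t.1, t.2.1, t.2.2]

def cIdx (c : Int) : Nat := ((c + 3) % 3).toNat

def tbump (t : Int × Int × Int) (c w : Int) : Int × Int × Int :=
  if cIdx c = 0 then (t.1 + w, t.2.1, t.2.2)
  else if cIdx c = 1 then (t.1, t.2.1 + w, t.2.2)
  else (t.1, t.2.1, t.2.2 + w)

def tfold (l : List (Int × Int)) (t : Int × Int × Int) : Int × Int × Int :=
  l.foldl (fun t p => tbump t p.1 p.2) t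

def tget (t : Int × Int × Int) (j : Nat) : Int :=
  if j = 0 then t.1 else if j = 1 then t.2.1 else t.2.2

def tmax (t : Int × Int × Int) : Int := max t.1 (max t.2.1 t.2.2)

def tsum3 (t : Int × Int × Int) : Int := t.1 + t.2.1 + t.2.2

def violT (t : Int × Int × Int) (total : Int) : Bool :=
  if tmax t ≥ 3 then true
  else if tget t 0 + (4 - total) ≥ 3 ∨ tget t 1 + (4 - total) ≥ 3 ∨ tget t 2 + (4 - total) ≥ 3 then false
  else true

-- occurrences of assigned colors in cons, each with weight 1
def occ (d : PySem.Dict Int Int) (cons : List Int) : List (Int × Int) :=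
  cons.filterMap (fun v => (d.get? v).map (fun c => (c, 1)))

-- weighted number of occurrences hitting slot j
def wsum (l : List (Int × Int)) (j : Nat) : Int :=
  (l.map (fun p => if cIdx p.1 = j then p.2 else 0)).sum

def addAll (vs_ : List Int) (cs : List Int) (poss : PySem.Dict Int (List Int)) : PySem.Dict Int (List Int) :=
  (vs_.zip cs).foldl (fun poss p => poss.modify p.1 PySem.Set.empty (fun s => PySem.Set.add s p.2)) poss

lemma bump_tl (t : Int × Int × Int) (c w : Int) (h1 : -3 ≤ c) (h2 : c ≤ 2) :
    PySem.List.pySetD (tl t) c (PySem.List.pyGetD (tl t) c 0 + w) = tl (tbump t c w) := by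
  obtain ⟨x, y, z⟩ := t
  interval_cases c <;>
    simp [tl, tbump, cIdx, PySem.List.pySetD, PySem.List.pySet?, PySem.List.pyIdx?,
      PySem.List.pyGetD, PySem.List.pyGet?]

lemma maxD_tl (t : Int × Int × Int) : PySem.List.maxD (tl t) (fun x => x) 0 = tmax t := by
  obtain ⟨x, y, z⟩ := t
  simp [tl, tmax, PySem.List.maxD, PySem.List.max?]
  split_ifs <;> (try simp) <;> split_ifs <;> simp_all <;> omega

lemma pyGetD_tl0 (t : Int × Int × Int) : PySem.List.pyGetD (tl t) 0 0 = tget t 0 := by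
  obtain ⟨x, y, z⟩ := t; simp [tl, tget, PySem.List.pyGetD, PySem.List.pyGet?, PySem.List.pyIdx?]

lemma pyGetD_tl1 (t : Int × Int × Int) : PySem.List.pyGetD (tl t) 1 0 = tget t 1 := by
  obtain ⟨x, y, z⟩ := t; simp [tl, tget, PySem.List.pyGetD, PySem.List.pyGet?, PySem.List.pyIdx?]

lemma pyGetD_tl2 (t : Int × Int × Int) : PySem.List.pyGetD (tl t) 2 0 = tget t 2 := by
  obtain ⟨x, y, z⟩ := t; simp [tl, tget, PySem.List.pyGetD, PySem.List.pyGet?, PySem.List.pyIdx?]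

lemma sum_tl (t : Int × Int × Int) : (tl t).sum = tsum3 t := by
  obtain ⟨x, y, z⟩ := t; simp [tl, tsum3]; ring

lemma cIdx_lt (c : Int) : cIdx c < 3 := by
  unfold cIdx
  have h1 := Int.emod_nonneg (c + 3) (by norm_num : (3:Int) ≠ 0)
  have h2 := Int.emod_lt_of_pos (c + 3) (by norm_num : (0:Int) < 3)
  omega

lemma tget_tbump (t : Int × Int × Int) (c w : Int) (j : Nat) (hj : j < 3) :
    tget (tbump t c w) j = tget t j + (if cIdx c = j then w else 0) := by
  obtain ⟨x, y, z⟩ := t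
  have h := cIdx_lt c
  interval_cases j <;> unfold tbump tget <;> split_ifs <;> simp_all <;> omega

lemma tget_tfold (l : List (Int × Int)) (t : Int × Int × Int) (j : Nat) (hj : j < 3) :
    tget (tfold l t) j = tget t j + wsum l j := by
  induction l generalizing t with
  | nil => simp [tfold, wsum]
  | cons p l ih =>
      simp only [tfold, List.foldl_cons, wsum, List.map_cons, List.sum_cons]
      rw [show List.foldl (fun t p => tbump t p.1 p.2) (tbump t p.1 p.2) l = tfold l (tbump t p.1 p.2) from rfl]
      rw [ih (tbump t p.1 p.2), tget_tbump t p.1 p.2 j hj]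
      simp [wsum]; ring

lemma tsum3_tbump (t : Int × Int × Int) (c w : Int) : tsum3 (tbump t c w) = tsum3 t + w := by
  obtain ⟨x, y, z⟩ := t; unfold tbump tsum3; split_ifs <;> simp <;> ring

lemma tsum3_tfold (l : List (Int × Int)) (t : Int × Int × Int) :
    tsum3 (tfold l t) = tsum3 t + (l.map (fun p => p.2)).sum := by
  induction l generalizing t with
  | nil => simp [tfold]
  | cons p l ih =>
      simp only [tfold, List.foldl_cons, List.map_cons, List.sum_cons]
      rw [show List.foldl (fun t p => tbump t p.1 p.2) (tbump t p.1 p.2) l = tfold l (tbump t p.1 p.2) from rfl]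
      rw [ih, tsum3_tbump]; ring

lemma tmax_tbump_le (t : Int × Int × Int) (c w : Int) (hw : 0 ≤ w) : tmax t ≤ tmax (tbump t c w) := by
  obtain ⟨x, y, z⟩ := t; unfold tbump tmax; split_ifs <;> simp <;> omega

lemma tmax_tfold_le (l : List (Int × Int)) (t : Int × Int × Int) (hw : ∀ p ∈ l, 0 ≤ p.2) :
    tmax t ≤ tmax (tfold l t) := by
  induction l generalizing t with
  | nil => simp [tfold]
  | cons p l ih =>
      simp only [tfold, List.foldl_cons]
      rw [show List.foldl (fun t p => tbump t p.1 p.2) (tbump t p.1 p.2) l = tfold l (tbump t p.1 p.2) from rfl]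
      exact le_trans (tmax_tbump_le t p.1 p.2 (hw p (by simp))) (ih (tbump t p.1 p.2) (fun q hq => hw q (by simp [hq])))

lemma text_eq (a b : Int × Int × Int) (h : ∀ j, j < 3 → tget a j = tget b j) : a = b := by
  obtain ⟨x, y, z⟩ := a; obtain ⟨x', y', z'⟩ := b
  have h0 := h 0 (by omega); have h1 := h 1 (by omega); have h2 := h 2 (by omega)
  simp [tget] at h0 h1 h2; simp_all

lemma foldl_id {α β : Type} (l : List α) (f : β → α → β) (acc : β)
    (h : ∀ (b : β) (x : α), x ∈ l → f b x = b) : l.foldl f acc = acc := by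
  induction l generalizing acc with
  | nil => rfl
  | cons x l ih => rw [List.foldl_cons, h acc x (by simp)]; exact ih acc (fun b y hy => h b y (by simp [hy]))

-- A's per-occurrence counting loop abstracted
lemma foldA_tl (d : PySem.Dict Int Int) (cons : List Int) (t : Int × Int × Int)
    (hr : ∀ v ∈ cons, ∀ c, d.get? v = some c → -3 ≤ c ∧ c ≤ 2) :
    cons.foldl (fun ct v =>
      match d.get? v with
      | none => ct
      | some color => PySem.List.pySetD ct color (PySem.List.pyGetD ct color 0 + 1)) (tl t)
    = tl (tfold (occ d cons) t) := by
  induction cons generalizing t with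
  | nil => simp [occ, tfold]
  | cons v cs ih =>
      rw [List.foldl_cons]
      cases hd : d.get? v with
      | none =>
          simp only [hd]
          rw [ih t (fun u hu => hr u (by simp [hu]))]
          simp [occ, hd]
      | some c =>
          simp only [hd]
          obtain ⟨h1, h2⟩ := hr v (by simp) c hd
          rw [bump_tl t c 1 h1 h2, ih (tbump t c 1) (fun u hu => hr u (by simp [hu]))]
          simp [occ, hd, tfold]

lemma occ_cons_some (d : PySem.Dict Int Int) (v : Int) (cs : List Int) (c : Int) (hd : d.get? v = some c) :
    occ d (v :: cs) = (c, 1) :: occ d cs := by simp [occ, hd]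

lemma occ_cons_none (d : PySem.Dict Int Int) (v : Int) (cs : List Int) (hd : d.get? v = none) :
    occ d (v :: cs) = occ d cs := by simp [occ, hd]

lemma sum_snd_occ (d : PySem.Dict Int Int) (cons : List Int)
    (h : ∀ v ∈ cons, (d.get? v).isSome) :
    ((occ d cons).map (fun p => p.2)).sum = (cons.length : Int) := by
  induction cons with
  | nil => simp [occ]
  | cons v cs ih =>
      cases hd : d.get? v with
      | none => exact absurd (h v (by simp)) (by simp [hd])
      | some c =>
          rw [occ_cons_some d v cs c hd]
          simp only [List.map_cons, List.sum_cons, List.length_cons]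
          rw [ih (fun u hu => h u (by simp [hu]))]
          push_cast; ring

lemma get?_foldl_insert (l : List (Int × Int)) (d : PySem.Dict Int Int) (x : Int)
    (hnd : (l.map Prod.fst).Nodup) :
    (l.foldl (fun t p => t.insert p.1 p.2) d).get? x
    = match l.find? (fun p => p.1 == x) with
      | some p => some p.2
      | none => d.get? x := by
  induction l generalizing d with
  | nil => rfl
  | cons p l ih =>
      obtain ⟨a, b⟩ := p
      simp only [List.map_cons, List.nodup_cons] at hnd
      rw [List.foldl_cons, ih (d.insert a b) hnd.2]
      by_cases hx : a = x
      · subst hx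
        have hfind : l.find? (fun p => p.1 == a) = none := by
          rw [List.find?_eq_none]
          intro q hq
          simp only [beq_iff_eq]
          intro hq1
          exact hnd.1 (hq1 ▸ List.mem_map_of_mem hq)
        simp [hfind, PySem.Dict.get?_insert_self]
      · by_cases hfx : (l.find? (fun p => p.1 == x)).isSome
        · obtain ⟨q, hq⟩ := Option.isSome_iff_exists.mp hfx
          simp [hq, show (a == x) = false by simp [hx]]
        · rw [Option.not_isSome_iff_eq_none] at hfx
          simp [hfx, show (a == x) = false by simp [hx],
            PySem.Dict.get?_insert_of_ne d b (fun h => hx h.symm)]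

lemma wsum_occ_insert (cons : List Int) (d : PySem.Dict Int Int) (v c : Int) (j : Nat)
    (hv : d.get? v = none) :
    wsum (occ (d.insert v c) cons) j
    = wsum (occ d cons) j + (if cIdx c = j then (PySem.List.count cons v : Int) else 0) := by
  induction cons with
  | nil => simp [occ, wsum, PySem.List.count]
  | cons u cs ih =>
      by_cases hu : u = v
      · subst hu
        rw [occ_cons_some (d.insert u c) u cs c (PySem.Dict.get?_insert_self d u c),
          occ_cons_none d u cs hv]
        have hcount : (PySem.List.count (u :: cs) u : Int) = (PySem.List.count cs u : Int) + 1 := by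
          simp [PySem.List.count]
        simp only [wsum, List.map_cons, List.sum_cons] at *
        rw [hcount]; rw [ih]; split_ifs <;> ring
      · have hg : (d.insert v c).get? u = d.get? u :=
          PySem.Dict.get?_insert_of_ne d c (fun h => hu h)
        have hcount : PySem.List.count (u :: cs) v = PySem.List.count cs v := by
          simp [PySem.List.count, hu]
        cases hd : d.get? u with
        | none =>
            rw [occ_cons_none (d.insert v c) u cs (hg.trans hd), occ_cons_none d u cs hd, ih, hcount]
        | some c' =>
            rw [occ_cons_some (d.insert v c) u cs c' (hg.trans hd), occ_cons_some d u cs c' hd]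
            simp only [wsum, List.map_cons, List.sum_cons] at *
            rw [ih, hcount]; ring

lemma wsum_occ_foldl_insert (zs : List (Int × Int)) (d : PySem.Dict Int Int) (cons : List Int) (j : Nat)
    (hnd : (zs.map Prod.fst).Nodup) (hdisj : ∀ p ∈ zs, d.get? p.1 = none) :
    wsum (occ (zs.foldl (fun t p => t.insert p.1 p.2) d) cons) j
    = wsum (occ d cons) j
      + wsum (zs.map (fun p => (p.2, (PySem.List.count cons p.1 : Int)))) j := by
  induction zs generalizing d with
  | nil => simp [wsum]
  | cons p zs ih =>
      obtain ⟨v, c⟩ := p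
      simp only [List.map_cons, List.nodup_cons] at hnd
      rw [List.foldl_cons]
      rw [ih (d.insert v c) hnd.2 ?hdisj]
      case hdisj =>
        intro q hq
        have hne : q.1 ≠ v := fun h => hnd.1 (h ▸ List.mem_map_of_mem hq)
        rw [PySem.Dict.get?_insert_of_ne d c hne]
        exact hdisj q (by simp [hq])
      rw [wsum_occ_insert cons d v c j (hdisj (v, c) (by simp))]
      simp only [List.map_cons, wsum, List.sum_cons]
      ring

-- every tuple produced by product_colors has full length and colors in {0,1,2}
lemma product_mem : ∀ (k : Nat), ∀ cs ∈ product_colors k, cs.length = k ∧ ∀ c ∈ cs, c = 0 ∨ c = 1 ∨ c = 2 := by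
  intro k
  induction k using product_colors.induct with
  | case1 => intro cs hcs; simp [product_colors] at hcs; simp [hcs]
  | case2 =>
      intro cs hcs
      simp [product_colors] at hcs
      rcases hcs with h | h | h <;> subst h <;> simp
  | case3 k ih =>
      intro cs hcs
      simp only [product_colors, List.mem_flatMap, List.mem_map] at hcs
      obtain ⟨pre, hpre, c, hc, rfl⟩ := hcs
      obtain ⟨hlen, hcol⟩ := ih pre hpre
      constructor
      · simp [hlen]
      · intro c' hc'
        rcases List.mem_append.mp hc' with h | h
        · exact hcol c' h
        · simp at h; subst h; simpa using hc

lemma product_succ (k : Nat) :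
    product_colors (k + 1) = (product_colors k).flatMap (fun pre => ([0, 1, 2] : List Int).map (fun c => pre ++ [c])) := by
  cases k with
  | zero => rfl
  | succ k => rfl

lemma product_cons (k : Nat) :
    product_colors (k + 1) = ([0, 1, 2] : List Int).flatMap (fun c => (product_colors k).map (fun cs => c :: cs)) := by
  induction k with
  | zero => rfl
  | succ k ih =>
      rw [product_succ (k + 1)]
      conv_lhs => rw [ih]
      conv_rhs => rw [product_succ k]
      simp [List.flatMap_def, List.map_map, Function.comp_def, List.map_flatten]

-- bDfs equals the filtered fold over all completions
lemma bRecord_eq (vs_ : List Int) (total : Int) (chosen : List Int) (t : Int × Int × Int)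
    (poss : PySem.Dict Int (List Int)) :
    bRecord vs_ total chosen (tl t) poss
    = if tget t 0 + (4 - total) ≥ 3 ∨ tget t 1 + (4 - total) ≥ 3 ∨ tget t 2 + (4 - total) ≥ 3 then
        addAll vs_ chosen poss
      else poss := by
  unfold bRecord addAll
  simp [pyGetD_tl0, pyGetD_tl1, pyGetD_tl2]

lemma violT_true_of_max (t : Int × Int × Int) (total : Int) (h : tmax t ≥ 3) : violT t total = true := by
  simp [violT, h]

lemma dfs_eq (vs_ : List Int) (total : Int) :
    ∀ (rest : List (Int × Int)) (t : Int × Int × Int) (chosen : List Int) (poss : PySem.Dict Int (List Int)),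
    (∀ p ∈ rest, 0 ≤ p.2) →
    bDfs vs_ total rest (tl t) chosen poss
    = (product_colors rest.length).foldl (fun poss suf =>
        if violT (tfold ((rest.zip suf).map (fun q => (q.2, q.1.2))) t) total then poss
        else addAll vs_ (chosen ++ suf) poss) poss := by
  intro rest
  induction rest with
  | nil =>
      intro t chosen poss hw
      rw [bDfs, maxD_tl]
      show (if tmax t ≥ 3 then poss else bRecord vs_ total chosen (tl t) poss) = _
      simp only [List.length_nil]
      rw [show product_colors 0 = [[]] from rfl]
      simp only [List.foldl_cons, List.foldl_nil, List.zip_nil_right, List.map_nil, List.append_nil]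
      rw [show tfold [] t = t from rfl, bRecord_eq]
      by_cases h1 : tmax t ≥ 3
      · rw [if_pos h1, violT_true_of_max t total h1, if_pos rfl]
      · rw [if_neg h1]
        by_cases h2 : tget t 0 + (4 - total) ≥ 3 ∨ tget t 1 + (4 - total) ≥ 3 ∨ tget t 2 + (4 - total) ≥ 3
        · rw [if_pos h2, show violT t total = false by simp [violT, h1, h2], if_neg (by simp)]
        · rw [if_neg h2, show violT t total = true by simp [violT, h1]; omega, if_pos rfl]
  | cons vw rest2 ih =>
      obtain ⟨v, w⟩ := vw
      intro t chosen poss hw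
      rw [bDfs, maxD_tl]
      show (if tmax t ≥ 3 then poss else _) = _
      by_cases hmax : tmax t ≥ 3
      · rw [if_pos hmax]
        refine (foldl_id _ _ _ ?_).symm
        intro b suf hsuf
        rw [violT_true_of_max _ total ?_, if_pos rfl]
        refine le_trans hmax (tmax_tfold_le _ t ?_)
        intro p hp
        simp only [List.mem_map] at hp
        obtain ⟨q, hq, rfl⟩ := hp
        exact hw q.1 (List.of_mem_zip hq).1
      · rw [if_neg hmax]
        have hw2 : ∀ p ∈ rest2, 0 ≤ p.2 := fun p hp => hw p (by simp [hp])
        have hwv : (0 : Int) ≤ w := hw (v, w) (by simp)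
        simp only [List.length_cons]
        rw [product_cons]
        rw [show ([0, 1, 2] : List Int).flatMap (fun c => (product_colors rest2.length).map (fun cs => c :: cs))
            = ((product_colors rest2.length).map (fun cs => (0:Int) :: cs))
              ++ (((product_colors rest2.length).map (fun cs => (1:Int) :: cs))
              ++ ((product_colors rest2.length).map (fun cs => (2:Int) :: cs))) by
          simp [List.flatMap_cons]]
        rw [List.foldl_append, List.foldl_append, List.foldl_map, List.foldl_map, List.foldl_map]
        rw [bump_tl t 0 w (by norm_num) (by norm_num), bump_tl t 1 w (by norm_num) (by norm_num),
          bump_tl t 2 w (by norm_num) (by norm_num)]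
        rw [ih (tbump t 0 w) (chosen ++ [0]) poss hw2]
        rw [ih (tbump t 1 w) (chosen ++ [1]) _ hw2]
        rw [ih (tbump t 2 w) (chosen ++ [2]) _ hw2]
        have hfun : ∀ c : Int, (fun (x : PySem.Dict Int (List Int)) (y : List Int) =>
              if violT (tfold (List.map (fun q => (q.2, q.1.2)) (((v, w) :: rest2).zip (c :: y))) t) total = true then x
              else addAll vs_ (chosen ++ c :: y) x)
            = (fun (poss : PySem.Dict Int (List Int)) (suf : List Int) =>
              if violT (tfold (List.map (fun q => (q.2, q.1.2)) (rest2.zip suf)) (tbump t c w)) total = true then poss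
              else addAll vs_ (chosen ++ [c] ++ suf) poss) := by
          intro c; funext x y
          have h1 : tfold (List.map (fun q => (q.2, q.1.2)) (((v, w) :: rest2).zip (c :: y))) t
              = tfold (List.map (fun q => (q.2, q.1.2)) (rest2.zip y)) (tbump t c w) := rfl
          have h2 : chosen ++ c :: y = chosen ++ [c] ++ y := by simp
          simp only [h1, ← h2]
        rw [hfun 0, hfun 1, hfun 2]

-- the deduplication loop building vars_in_cons
lemma vs_spec (adict : PySem.Dict Int Int) :
    ∀ (cons : List Int) (acc : List Int), acc.Nodup → (∀ v ∈ acc, adict.contains v = false) →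
    (cons.foldl (fun vs var => if !(adict.contains var) && !(vs.contains var) then vs ++ [var] else vs) acc).Nodup
    ∧ (∀ v ∈ (cons.foldl (fun vs var => if !(adict.contains var) && !(vs.contains var) then vs ++ [var] else vs) acc), adict.contains v = false)
    ∧ (∀ v, v ∈ (cons.foldl (fun vs var => if !(adict.contains var) && !(vs.contains var) then vs ++ [var] else vs) acc)
        ↔ (v ∈ acc ∨ (v ∈ cons ∧ adict.contains v = false))) := by
  intro cons
  induction cons with
  | nil => intro acc h1 h2; exact ⟨h1, h2, fun v => by simp⟩
  | cons u cs ih =>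
      intro acc h1 h2
      rw [List.foldl_cons]
      by_cases hcond : (!(adict.contains u) && !(acc.contains u)) = true
      · simp only [hcond, if_pos]
        simp only [Bool.and_eq_true, Bool.not_eq_true'] at hcond
        have hnotmem : u ∉ acc := by
          intro h; rw [List.contains_eq_mem] at hcond; simp [h] at hcond
        obtain ⟨ha, hb, hc⟩ := ih (acc ++ [u])
          (by simp [List.nodup_append, h1]; intro a ha h; exact hnotmem (h ▸ ha))
          (by intro v hv
              rcases List.mem_append.mp hv with h | h
              · exact h2 v h
              · simp at h; subst h; exact hcond.1)
        refine ⟨ha, hb, fun v => ?_⟩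
        rw [hc v]
        constructor
        · rintro (hv | hv)
          · rcases List.mem_append.mp hv with h | h
            · exact Or.inl h
            · simp at h; subst h; exact Or.inr ⟨by simp, hcond.1⟩
          · exact Or.inr ⟨by simp [hv.1], hv.2⟩
        · rintro (hv | ⟨hv1, hv2⟩)
          · exact Or.inl (by simp [hv])
          · rcases List.mem_cons.mp hv1 with h | h
            · subst h; exact Or.inl (by simp)
            · exact Or.inr ⟨h, hv2⟩
      · simp only [Bool.not_eq_true] at hcond
        rw [if_neg (by
          simp
          intro h
          rcases Bool.eq_false_or_eq_true (acc.contains u) with h' | h'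
          · rwa [List.contains_eq_mem, decide_eq_true_iff] at h'
          · rw [h, h'] at hcond; simp at hcond)]
        obtain ⟨ha, hb, hc⟩ := ih acc h1 h2
        refine ⟨ha, hb, fun v => ?_⟩
        rw [hc v]
        constructor
        · rintro (hv | hv)
          · exact Or.inl hv
          · exact Or.inr ⟨by simp [hv.1], hv.2⟩
        · rintro (hv | ⟨hv1, hv2⟩)
          · exact Or.inl hv
          · rcases List.mem_cons.mp hv1 with h | h
            · -- condition failed: either contains u = true (contradicts hv2) or u ∈ acc
              have hu2 : adict.contains u = false := h ▸ hv2
              have : acc.contains u = true := by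
                rcases Bool.eq_false_or_eq_true (acc.contains u) with h'' | h''
                · exact h''
                · exfalso; rw [hu2, h''] at hcond; simp at hcond
              exact Or.inl (by rw [h]; rwa [List.contains_eq_mem, decide_eq_true_iff] at this)
            · exact Or.inr ⟨h, hv2⟩

lemma violatesA_eq (cons : List Int) (trial : PySem.Dict Int Int)
    (hr : ∀ v ∈ cons, ∀ c, trial.get? v = some c → -3 ≤ c ∧ c ≤ 2)
    (ht : ∀ v ∈ cons, (trial.get? v).isSome) :
    violatesA cons trial = violT (tfold (occ trial cons) (0, 0, 0)) ((cons.length : Int)) := by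
  have h1 : cons.foldl (fun ct v =>
      match trial.get? v with
      | none => ct
      | some color => PySem.List.pySetD ct color (PySem.List.pyGetD ct color 0 + 1)) ([0, 0, 0] : List Int)
      = tl (tfold (occ trial cons) (0, 0, 0)) :=
    foldA_tl trial cons (0, 0, 0) hr
  have h2 : tsum3 (tfold (occ trial cons) (0, 0, 0)) = (cons.length : Int) := by
    rw [tsum3_tfold, sum_snd_occ trial cons ht]; simp [tsum3]
  set T := tfold (occ trial cons) (0, 0, 0) with hT
  unfold violatesA violT
  rw [h1]
  show (if PySem.List.maxD (tl T) (fun x => x) 0 ≥ 3 then true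
    else if ([0, 1, 2].any fun color => decide (PySem.List.pyGetD (tl T) color 0 + (4 - (tl T).sum) ≥ 3)) = true then false
    else true) = _
  rw [maxD_tl, sum_tl, h2]
  by_cases hm : tmax T ≥ 3
  · simp [hm]
  · simp only [hm, if_false]
    by_cases h3 : tget T 0 + (4 - (cons.length : Int)) ≥ 3 ∨ tget T 1 + (4 - (cons.length : Int)) ≥ 3
        ∨ tget T 2 + (4 - (cons.length : Int)) ≥ 3
    · rw [if_pos h3, if_pos]
      simp only [List.any_cons, List.any_nil, pyGetD_tl0, pyGetD_tl1, pyGetD_tl2,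
        Bool.or_eq_true, decide_eq_true_eq]
      tauto
    · rw [if_neg h3, if_neg]
      simp only [List.any_cons, List.any_nil, pyGetD_tl0, pyGetD_tl1, pyGetD_tl2,
        Bool.or_eq_true, decide_eq_true_eq]
      tauto

-- ===== VERDICT (by name: the statement is the Claim_ definition above) =====
theorem constraint_domain_spec : Claim_equal_constraint_domain := by
  intro cons assignment hdom hpre
  unfold Spec_constraint_domain constraint_domain constraint_domain_alt
  simp only []
  set adict : PySem.Dict Int Int := PySem.Dict.mk assignment with hadict
  set vsE := cons.foldl (fun vs var => if !(adict.contains var) && !(vs.contains var) then vs ++ [var] else vs) ([] : List Int) with hvsE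
  obtain ⟨hnd, hvc, hmem⟩ := vs_spec adict cons [] (by simp) (by simp)
  rw [← hvsE] at hnd hvc hmem
  by_cases hvs : vsE = []
  · simp [hvs]
  · simp only [hvs, if_false]
    -- A never raises here, so the color-range disjunct of Pre_ holds
    have hrange : ∀ v ∈ cons, ∀ c, adict.get? v = some c → -3 ≤ c ∧ c ≤ 2 := by
      rcases hpre with hall | hr
      · exfalso
        apply hvs
        rw [List.eq_nil_iff_forall_not_mem]
        intro v hv
        rcases (hmem v).mp hv with h | h
        · simp at h
        · rw [hall v h.1] at h; simp at h
      · intro v hv c hc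
        have := hr v hv
        rw [hc] at this
        simp only [Option.all_some, decide_eq_true_eq] at this
        exact this
    congr 1
    -- base counts
    set tbase := tfold (occ adict cons) (0, 0, 0) with htbase
    have hbase : cons.foldl (fun b var =>
        match adict.get? var with
        | none => b
        | some color => PySem.List.pySetD b color (PySem.List.pyGetD b color 0 + 1)) ([0, 0, 0] : List Int)
        = tl tbase := foldA_tl adict cons (0, 0, 0) hrange
    rw [hbase]
    set pairs := vsE.map (fun v => (v, (PySem.List.count cons v : Int))) with hpairs
    -- B's dfs as a fold
    rw [dfs_eq vsE (PySem.List.len cons) pairs tbase []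
        (vsE.foldl (fun d v => d.insert v PySem.Set.empty) PySem.Dict.empty)
        (by intro p hp; simp only [hpairs, List.mem_map] at hp; obtain ⟨v, _, rfl⟩ := hp; positivity)]
    have hplen : pairs.length = vsE.length := by simp [hpairs]
    rw [hplen]
    congr 1
    apply PySem.List.foldl_congr_mem
    intro poss cs hcs
    obtain ⟨hlen, hcol⟩ := product_mem vsE.length cs hcs
    -- B-side function at cs
    have hBzip : (pairs.zip cs).map (fun q => (q.2, q.1.2))
        = (vsE.zip cs).map (fun p => (p.2, (PySem.List.count cons p.1 : Int))) := by
      rw [hpairs, List.zip_map_left, List.map_map]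
      rfl
    -- properties of the trial dictionary
    set zs := vsE.zip cs with hzs
    have hfst : zs.map Prod.fst = vsE := List.map_fst_zip (by rw [hlen] : vsE.length ≤ cs.length)
    have hznd : (zs.map Prod.fst).Nodup := by rw [hfst]; exact hnd
    set trial := zs.foldl (fun t p => t.insert p.1 p.2) adict with htrial
    have hdisj : ∀ p ∈ zs, adict.get? p.1 = none := by
      intro p hp
      have : p.1 ∈ vsE := by rw [← hfst]; exact List.mem_map_of_mem hp
      rw [PySem.Dict.get?_eq_none_iff_contains]
      exact hvc p.1 this
    have hget : ∀ x, trial.get? x = match zs.find? (fun p => p.1 == x) with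
        | some p => some p.2
        | none => adict.get? x := fun x => get?_foldl_insert zs adict x hznd
    have htr : ∀ v ∈ cons, ∀ c, trial.get? v = some c → -3 ≤ c ∧ c ≤ 2 := by
      intro v hv c hc
      rw [hget v] at hc
      cases hf : zs.find? (fun p => p.1 == v) with
      | some p =>
          rw [hf] at hc
          have hc2 : p.2 ∈ cs := (List.of_mem_zip (List.mem_of_find?_eq_some hf)).2
          have hceq : c = p.2 := (Option.some.inj hc).symm
          rcases hcol p.2 hc2 with h | h | h <;> omega
      | none =>
          rw [hf] at hc
          exact hrange v hv c hc
    have htt : ∀ v ∈ cons, (trial.get? v).isSome := by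
      intro v hv
      rw [hget v]
      cases hf : zs.find? (fun p => p.1 == v) with
      | some p => simp
      | none =>
          simp only []
          by_cases hvin : v ∈ vsE
          · exfalso
            obtain ⟨p, hp, hp1⟩ := List.mem_map.mp (by rw [hfst]; exact hvin : v ∈ zs.map Prod.fst)
            have := List.find?_eq_none.mp hf p hp
            simp [hp1] at this
          · have hcontains : adict.contains v = true := by
              rcases Bool.eq_false_or_eq_true (adict.contains v) with h | h
              · exact h
              · exact absurd ((hmem v).mpr (Or.inr ⟨hv, h⟩)) hvin
            rw [PySem.Dict.contains_eq_isSome_get?] at hcontains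
            exact hcontains
    -- the counts triples agree
    have hTeq : tfold (occ trial cons) (0, 0, 0)
        = tfold ((vsE.zip cs).map (fun p => (p.2, (PySem.List.count cons p.1 : Int)))) tbase := by
      apply text_eq
      intro j hj
      rw [tget_tfold _ _ j hj, tget_tfold _ _ j hj, htbase, tget_tfold _ _ j hj]
      rw [htrial, wsum_occ_foldl_insert zs adict cons j hznd hdisj]
      ring
    have hviol : violatesA cons trial = violT (tfold ((vsE.zip cs).map (fun p => (p.2, (PySem.List.count cons p.1 : Int)))) tbase) ((cons.length : Int)) := by
      rw [violatesA_eq cons trial htr htt, hTeq]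
    rw [hBzip]
    rw [show PySem.List.len cons = (cons.length : Int) from PySem.List.len_eq cons]
    rw [← hviol]
    simp only [List.nil_append]
    cases hb : violatesA cons trial <;> simp [addAll, hzs]
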